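-- pv_equiv track=rewrite | github.com/guillebasterra/leetcode_solutions | number_sequence.py | findCoins
-- ===== SOURCE A (Python) =====
-- def findCoins(board: str) -> int:
--     max_coins = 0
--
--     for i in {0,1,2}:
--         firstT = 0
--         for j in range(i,len(board),2):
--             if board[j] == 'T':
--                 firstT = 1
--             if firstT and board[j] == 'C':
--                 max_coins +=1
--     return max_coins
-- ===== SOURCE B (Python) =====
-- def findCoins(board: str) -> int:
--     total = 0
--     for i in (0, 1, 2):
--         sub = board[i::2]
--         t = sub.find('T')
--         if t != -1:
--             total += sub[t:].count('C')
--     return total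
-- ===== Notes on version B (the rewrite author's own statement) =====
-- stated objective: faster
-- what changed: Replaces A's stateful index loop with a firstT flag by a built-in decomposition: for each offset take the strided slice board[i::2], locate the first treasure character with str.find, and count the coin characters in the tail slice.
import Mathlib
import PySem

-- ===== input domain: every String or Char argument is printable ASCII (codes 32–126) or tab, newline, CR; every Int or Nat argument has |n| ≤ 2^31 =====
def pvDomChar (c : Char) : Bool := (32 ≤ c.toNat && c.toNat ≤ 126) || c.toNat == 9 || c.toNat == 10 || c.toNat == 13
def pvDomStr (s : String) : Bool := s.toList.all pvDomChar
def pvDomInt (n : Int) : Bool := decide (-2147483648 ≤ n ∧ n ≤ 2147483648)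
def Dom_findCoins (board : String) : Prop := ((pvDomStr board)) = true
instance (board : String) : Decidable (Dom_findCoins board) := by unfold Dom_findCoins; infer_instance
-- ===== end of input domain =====

-- B replaces A's stateful firstT-flag index loop by the slice/find/count built-in decomposition (measured faster by a constant factor in a timing run).

-- ===== PORT A =====
def findCoins (board : String) : Int :=
  ([0, 1, 2] : List Int).foldl (fun max_coins i =>
    ((PySem.List.pyRange i (PySem.Str.len board) 2).foldl
      (fun (st : Int × Int) j =>
        let c := PySem.List.pyGetD board.toList j ' '
        let firstT : Int := if c = 'T' then 1 else st.1
        (firstT, if firstT ≠ 0 ∧ c = 'C' then st.2 + 1 else st.2))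
      (0, max_coins)).2) 0

-- ===== PORT B =====
def findCoins_alt (board : String) : Int :=
  ([0, 1, 2] : List Int).foldl (fun total i =>
    match PySem.Str.slice? board (some i) none 2 with
    | none => total
    | some sub =>
      let t := PySem.Str.find sub "T"
      if t ≠ -1 then total + (PySem.Str.count (PySem.Str.slice sub (some t) none) "C" : Int)
      else total) 0

-- ===== PRECONDITION & SPEC =====
def Spec_findCoins (board : String) (out : Int) : Prop := out = findCoins_alt board
instance (board : String) (out : Int) : Decidable (Spec_findCoins board out) := by unfold Spec_findCoins; infer_instance

-- ===== CLAIM (what is proved, stated in full; the proofs are below) =====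
def Claim_equal_findCoins : Prop := ∀ (board : String), Dom_findCoins board → Spec_findCoins board (findCoins board)

-- ===== LEMMAS AND PROOFS =====

-- A's loop body as a named step function (proof-side only; the port inlines it, definitionally equal)
def pvStep (st : Int × Int) (c : Char) : Int × Int :=
  let firstT : Int := if c = 'T' then 1 else st.1
  (firstT, if firstT ≠ 0 ∧ c = 'C' then st.2 + 1 else st.2)

lemma pvL1 (l : List Char) (h : 'T' ∉ l) (acc : Int) : l.foldl pvStep (0, acc) = (0, acc) := by
  induction l with
  | nil => rfl
  | cons c t ih =>
    have hc : c ≠ 'T' := fun e => h (e ▸ List.mem_cons_self)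
    have hC : ¬ ((0:Int) ≠ 0 ∧ c = 'C') := by simp
    simp only [List.foldl_cons, pvStep, if_neg hc, if_neg hC]
    exact ih (fun hm => h (List.mem_cons_of_mem _ hm))

lemma pvL2 (l : List Char) (acc : Int) : l.foldl pvStep (1, acc) = (1, acc + l.count 'C') := by
  induction l generalizing acc with
  | nil => simp
  | cons c t ih =>
    by_cases hc : c = 'C'
    · subst hc
      simp only [List.foldl_cons, pvStep]
      norm_num [ih, List.count_cons]
      ring_nf
    · simp only [List.foldl_cons, pvStep]
      by_cases ht : c = 'T' <;> simp [hc, ht, ih]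

lemma pvCountGo (fuel : Nat) (l : List Char) (acc : Nat) (h : l.length ≤ fuel) :
    PySem.Chars.count.go ['C'] fuel l acc = acc + l.count 'C' := by
  induction fuel generalizing l acc with
  | zero =>
    have : l = [] := List.length_eq_zero_iff.mp (Nat.le_zero.mp h)
    subst this; rfl
  | succ n ih =>
    cases l with
    | nil => rfl
    | cons c t =>
      by_cases hc : c = 'C'
      · subst hc
        simp only [PySem.Chars.count.go, List.isPrefixOf, List.count_cons]
        simp only [beq_self_eq_true, Bool.and_true, if_pos,
          List.length_cons, List.length_nil, List.drop_succ_cons, List.drop_zero]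
        rw [ih t (acc + 1) (Nat.succ_le_succ_iff.mp (by simpa using h))]
        omega
      · simp only [PySem.Chars.count.go, List.isPrefixOf]
        have : ('C' == c) = false := by simpa using fun e => hc e.symm
        simp only [this, Bool.false_and, if_neg Bool.false_ne_true]
        rw [ih t acc (by simpa using Nat.succ_le_succ_iff.mp h)]
        simp [hc]

lemma pvCountC (l : List Char) : PySem.Chars.count l ['C'] = l.count 'C' := by
  simp only [PySem.Chars.count, List.isEmpty_cons, if_neg Bool.false_ne_true]
  simpa using pvCountGo l.length l 0 le_rfl

lemma pvFindGoNot (l : List Char) (h : 'T' ∉ l) (k : Nat) :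
    PySem.Chars.find.go ['T'] l k = -1 := by
  induction l generalizing k with
  | nil => rfl
  | cons c t ih =>
    have hcc : c ≠ 'T' := fun e => h (by rw [e]; exact List.mem_cons_self)
    have hc : ('T' == c) = false := beq_eq_false_iff_ne.mpr (Ne.symm hcc)
    simp only [PySem.Chars.find.go, List.isPrefixOf, hc, Bool.false_and, if_neg Bool.false_ne_true]
    exact ih (fun hm => h (List.mem_cons_of_mem _ hm)) (k + 1)

lemma pvFindGoMem (pre suf : List Char) (h : 'T' ∉ pre) (k : Nat) :
    PySem.Chars.find.go ['T'] (pre ++ 'T' :: suf) k = (k : Int) + pre.length := by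
  induction pre generalizing k with
  | nil =>
    simp only [List.nil_append, PySem.Chars.find.go, List.isPrefixOf]
    simp
  | cons c t ih =>
    have hcc : c ≠ 'T' := fun e => h (by rw [e]; exact List.mem_cons_self)
    have hc : ('T' == c) = false := beq_eq_false_iff_ne.mpr (Ne.symm hcc)
    simp only [List.cons_append, PySem.Chars.find.go, List.isPrefixOf, hc, Bool.false_and,
      if_neg Bool.false_ne_true]
    rw [ih (fun hm => h (List.mem_cons_of_mem _ hm)) (k + 1)]
    push_cast [List.length_cons]
    ring

-- the central fact: A's stateful scan over a char list = B's find-then-count-tail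
lemma pvScan (l : List Char) (acc : Int) :
    (l.foldl pvStep (0, acc)).2 =
      (if PySem.Chars.find l ['T'] ≠ -1
       then acc + ((l.drop (PySem.Chars.find l ['T']).toNat).count 'C' : Int)
       else acc) := by
  by_cases hm : 'T' ∈ l
  · obtain ⟨k, hk⟩ := Option.isSome_iff_exists.mp ((PySem.List.index?_isSome_iff l 'T').mpr hm)
    obtain ⟨pre, suf, rfl, hlen, hpre⟩ :=
      (PySem.List.index?_eq_some_iff _ _ _).1 hk
    have hfind : PySem.Chars.find (pre ++ 'T' :: suf) ['T'] = (pre.length : Int) := by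
      simpa using pvFindGoMem pre suf hpre 0
    rw [hfind]
    have hne : ((pre.length : Int)) ≠ -1 := by omega
    rw [if_pos hne]
    have hdrop : (pre ++ 'T' :: suf).drop ((pre.length : Int)).toNat = 'T' :: suf := by
      simp
    rw [hdrop]
    rw [List.foldl_append, pvL1 pre hpre acc]
    simp only [List.foldl_cons, pvStep]
    norm_num
    rw [pvL2]
    simp
  · have hfind : PySem.Chars.find l ['T'] = -1 := pvFindGoNot l hm 0
    rw [hfind, pvL1 l hm acc]
    simp



-- the strided slice xs[i::2] is the pyGetD image of range(i, len, 2)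
lemma pvStride (xs : List Char) (i : Int) (hi : 0 ≤ i) :
    PySem.Chars.slice? xs (some i) none 2 =
      some ((PySem.List.pyRange i (xs.length : Int) 2).map (fun j => PySem.List.pyGetD xs j ' ')) := by
  rw [PySem.Chars.slice?, PySem.List.slice?, PySem.List.sliceIndices,
    PySem.List.pyRange_of_pos i (xs.length : Int) (by norm_num)]
  norm_num
  by_cases hle : i ≤ (xs.length : Int)
  · have hmin : min i (xs.length : Int) = i := min_eq_left hle
    simp only [if_neg (not_lt.mpr hi), hmin]
    by_cases hlt : i < (xs.length : Int)
    · simp only [if_pos hlt]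
      apply List.filterMap_eq_map_iff_forall_eq_some.mpr
      intro k hk
      simp only [List.mem_range] at hk
      have hidx : i + 2 * (k : Int) < (xs.length : Int) := by omega
      have h0 : 0 ≤ i + 2 * (k : Int) := by positivity
      have hlt' : (i + 2 * (k : Int)).toNat < xs.length := by omega
      simp only [Function.comp]
      rw [List.getElem?_eq_getElem hlt', PySem.List.pyGetD_eq_getElem xs ' ' h0 (by omega)]
    · simp [if_neg hlt]
  · have hgt : (xs.length : Int) < i := lt_of_not_ge hle
    have hmin : min i (xs.length : Int) = (xs.length : Int) := min_eq_right hgt.le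
    have h1 : ¬ i < (xs.length : Int) := by omega
    simp [if_neg (not_lt.mpr hi), hmin, h1]

lemma pvFindGoLB (l : List Char) (k : Nat) :
    PySem.Chars.find.go ['T'] l k = -1 ∨ (k : Int) ≤ PySem.Chars.find.go ['T'] l k := by
  induction l generalizing k with
  | nil => left; rfl
  | cons c t ih =>
    by_cases hp : (['T'].isPrefixOf (c :: t)) = true
    · right; simp [PySem.Chars.find.go, hp]
    · simp only [PySem.Chars.find.go, if_neg hp]
      rcases ih (k + 1) with h | h
      · left; exact h
      · right; exact le_trans (by push_cast; omega) h

-- inner pass of A (stateful scan over range(i, len, 2)) = inner branch of B (slice/find/count)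
lemma pvInner (board : String) (i : Int) (hi : 0 ≤ i) (acc : Int) :
    ((PySem.List.pyRange i (PySem.Str.len board) 2).foldl
      (fun (st : Int × Int) j =>
        let c := PySem.List.pyGetD board.toList j ' '
        let firstT : Int := if c = 'T' then 1 else st.1
        (firstT, if firstT ≠ 0 ∧ c = 'C' then st.2 + 1 else st.2)) (0, acc)).2
    = (match PySem.Str.slice? board (some i) none 2 with
       | none => acc
       | some sub =>
         let t := PySem.Str.find sub "T"
         if t ≠ -1 then acc + (PySem.Str.count (PySem.Str.slice sub (some t) none) "C" : Int)
         else acc) := by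
  have hfun : (fun (st : Int × Int) j =>
        let c := PySem.List.pyGetD board.toList j ' '
        let firstT : Int := if c = 'T' then 1 else st.1
        (firstT, if firstT ≠ 0 ∧ c = 'C' then st.2 + 1 else st.2))
      = (fun (st : Int × Int) (j : Int) => pvStep st (PySem.List.pyGetD board.toList j ' ')) := rfl
  rw [hfun]
  set L := (PySem.List.pyRange i ((board.toList.length : Int)) 2).map
      (fun j => PySem.List.pyGetD board.toList j ' ') with hL
  have hslice : PySem.Str.slice? board (some i) none 2 = some (String.ofList L) := by
    rw [PySem.Str.slice?, pvStride board.toList i hi]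
    rfl
  rw [PySem.Str.len_eq, ← List.foldl_map (f := fun j => PySem.List.pyGetD board.toList j ' ')
    (g := pvStep), ← hL, hslice]
  simp only
  have htL : (String.ofList L).toList = L := String.toList_ofList
  have hfind : PySem.Str.find (String.ofList L) "T" = PySem.Chars.find L ['T'] := by
    rw [PySem.Str.find, htL]; rfl
  rw [pvScan L acc, hfind]
  by_cases hne : PySem.Chars.find L ['T'] ≠ -1
  · rw [if_pos hne, if_pos hne]
    have h0 : 0 ≤ PySem.Chars.find L ['T'] := by
      rcases pvFindGoLB L 0 with h | h
      · exact absurd h hne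
      · simpa using h
    have hcnt : PySem.Str.count (PySem.Str.slice (String.ofList L) (some (PySem.Chars.find L ['T'])) none) "C"
        = (L.drop (PySem.Chars.find L ['T']).toNat).count 'C' := by
      have hC : "C".toList = ['C'] := by decide
      rw [PySem.Str.count, PySem.Str.slice, String.toList_ofList, hC, PySem.Chars.slice, htL,
        PySem.List.slice_from L h0]
      exact pvCountC _
    rw [hcnt]
  · rw [if_neg hne, if_neg hne]

-- ===== VERDICT (by name: the statement is the Claim_ definition above) =====
theorem findCoins_spec : Claim_equal_findCoins := by
  unfold Claim_equal_findCoins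
  intro board _
  unfold Spec_findCoins findCoins findCoins_alt
  simp only [List.foldl_cons, List.foldl_nil]
  rw [pvInner board 0 (by norm_num), pvInner board 1 (by norm_num), pvInner board 2 (by norm_num)]
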